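-- pv_equiv track=rewrite | github.com/arch-yunus/Yoneylem-Ders-Notlari | 08_Game_Theory/nash_equilibrium_finder.py | pareto_analysis
-- ===== SOURCE A (Python) =====
-- def pareto_analysis(R: list, C: list,
--                     row_labels: list = None, col_labels: list = None) -> list:
--     """
--     Pareto Optimum sonuç profillerini bul.
--     (i*,j*) Pareto optimal ← Başka hiçbir (i,j) her iki oyuncuyu da daha iyi yapamaz.
--     """
--     m = len(R)
--     n = len(R[0])
--     outcomes = [(i, j, R[i][j], C[i][j]) for i in range(m) for j in range(n)]
--
--     rows = row_labels or [f"S{i+1}" for i in range(m)]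
--     cols = col_labels or [f"C{j+1}" for j in range(n)]
--
--     pareto_optimal = []
--     for (i, j, r, c) in outcomes:
--         dominated = False
--         for (i2, j2, r2, c2) in outcomes:
--             if (i2, j2) != (i, j) and r2 >= r and c2 >= c and (r2 > r or c2 > c):
--                 dominated = True
--                 break
--         if not dominated:
--             pareto_optimal.append((i, j, r, c))
--
--     return pareto_optimal
-- ===== SOURCE B (Python) =====
-- def pareto_analysis(R: list, C: list,
--                     row_labels: list = None, col_labels: list = None) -> list:
--     """Pareto-optimal outcomes via sort + single sweep (skyline), then a filter
--     in original order."""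
--     m = len(R)
--     n = len(R[0])
--     outcomes = [(i, j, R[i][j], C[i][j]) for i in range(m) for j in range(n)]
--
--     pts = sorted([(r, c) for (_i, _j, r, c) in outcomes], reverse=True)
--     frontier = set()
--     best = None
--     for (r, c) in pts:
--         if best is None or c > best:
--             frontier.add((r, c))
--             best = c
--
--     return [(i, j, r, c) for (i, j, r, c) in outcomes if (r, c) in frontier]
-- ===== Notes on version B (the rewrite author's own statement) =====
-- stated objective: faster
-- what changed: A tests every outcome against every other outcome for domination (all-pairs scan); B sorts the payoff pairs lexicographically descending once, computes the Pareto frontier in a single running-max sweep, and then keeps the outcomes whose payoff pair is in that frontier set, preserving the original order.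
import Mathlib
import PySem

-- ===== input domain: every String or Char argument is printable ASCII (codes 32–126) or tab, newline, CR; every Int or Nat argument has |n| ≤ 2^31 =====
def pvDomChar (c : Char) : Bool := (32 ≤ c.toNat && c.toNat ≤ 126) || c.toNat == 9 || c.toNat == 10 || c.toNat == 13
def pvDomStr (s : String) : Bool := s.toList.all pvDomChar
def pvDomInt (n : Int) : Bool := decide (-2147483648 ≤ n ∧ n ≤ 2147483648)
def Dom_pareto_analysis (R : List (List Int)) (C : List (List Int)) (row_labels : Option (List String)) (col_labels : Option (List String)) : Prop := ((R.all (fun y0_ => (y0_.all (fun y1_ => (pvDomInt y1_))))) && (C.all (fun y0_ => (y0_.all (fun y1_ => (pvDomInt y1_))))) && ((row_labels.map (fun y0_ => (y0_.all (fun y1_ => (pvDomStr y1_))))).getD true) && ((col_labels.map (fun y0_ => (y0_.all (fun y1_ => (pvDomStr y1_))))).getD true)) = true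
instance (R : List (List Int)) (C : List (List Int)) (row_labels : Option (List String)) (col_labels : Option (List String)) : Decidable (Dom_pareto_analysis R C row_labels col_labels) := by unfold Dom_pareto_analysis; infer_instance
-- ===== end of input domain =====

-- B replaces A's all-pairs domination scan by sort + one skyline sweep + a set-membership
-- filter in original order (objective: faster). The labels A builds are unused for its result.

-- ===== PORT A =====
-- outcomes = [(i, j, R[i][j], C[i][j]) for i in range(m) for j in range(n)]
-- (identical comprehension line in A and B, hence one shared helper)
def pvOutcomes (R : List (List Int)) (C : List (List Int)) : List (Int × Int × Int × Int) :=
  (PySem.List.pyRange 0 (R.length : Int) 1).flatMap (fun i =>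
    (PySem.List.pyRange 0 ((PySem.List.pyGetD R 0 []).length : Int) 1).map (fun j =>
      (i, j, PySem.List.pyGetD (PySem.List.pyGetD R i []) j 0,
             PySem.List.pyGetD (PySem.List.pyGetD C i []) j 0)))

-- A's inner 'for … break' loop setting 'dominated'
def pvInnerA (p : Int × Int × Int × Int) : List (Int × Int × Int × Int) → Bool
  | [] => false
  | q :: t =>
    if (q.1, q.2.1) ≠ (p.1, p.2.1) ∧ q.2.2.1 ≥ p.2.2.1 ∧ q.2.2.2 ≥ p.2.2.2 ∧
        (q.2.2.1 > p.2.2.1 ∨ q.2.2.2 > p.2.2.2) then true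
    else pvInnerA p t

-- rows/cols label lists are computed by A but do not influence the returned value; omitted (pure).
def pareto_analysis (R : List (List Int)) (C : List (List Int)) (row_labels : Option (List String)) (col_labels : Option (List String)) : List (Int × Int × Int × Int) :=
  let outcomes := pvOutcomes R C
  outcomes.foldl (fun acc p => if !pvInnerA p outcomes then acc ++ [p] else acc) []

-- ===== PORT B =====
def pareto_analysis_alt (R : List (List Int)) (C : List (List Int)) (row_labels : Option (List String)) (col_labels : Option (List String)) : List (Int × Int × Int × Int) :=
  let outcomes := pvOutcomes R C
  let pts := PySem.List.sorted2 (outcomes.map (fun p => (p.2.2.1, p.2.2.2)))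
      (fun x => x.1) (fun x => x.2) true
  let st := pts.foldl
    (fun (acc : PySem.Set (Int × Int) × Option Int) q =>
      match acc.2 with
      | none => (PySem.Set.add acc.1 q, some q.2)
      | some b => if b < q.2 then (PySem.Set.add acc.1 q, some q.2) else acc)
    (PySem.Set.empty, none)
  outcomes.filter (fun p => PySem.Set.contains st.1 (p.2.2.1, p.2.2.2))

-- ===== PRECONDITION & SPEC =====
-- Pre_ excludes exactly the inputs where Python A raises IndexError: empty R (R[0]),
-- or (when n = len(R[0]) > 0) some accessed row R[i] or C[i] with i < len(R) too short or missing.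
def Pre_pareto_analysis (R : List (List Int)) (C : List (List Int)) (row_labels : Option (List String)) (col_labels : Option (List String)) : Prop :=
  R ≠ [] ∧ ((R.headD []).length = 0 ∨
    ((∀ row ∈ R, (R.headD []).length ≤ row.length) ∧ R.length ≤ C.length ∧
     ∀ row ∈ C.take R.length, (R.headD []).length ≤ row.length))
instance (R : List (List Int)) (C : List (List Int)) (row_labels : Option (List String)) (col_labels : Option (List String)) : Decidable (Pre_pareto_analysis R C row_labels col_labels) := by unfold Pre_pareto_analysis; infer_instance

def pvWitness_pareto_analysis : List (List Int) × List (List Int) × Option (List String) × Option (List String) :=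
  ([[1, 2], [0, 3]], [[3, 0], [2, 1]], none, none)

def Spec_pareto_analysis (R : List (List Int)) (C : List (List Int)) (row_labels : Option (List String)) (col_labels : Option (List String)) (out : List (Int × Int × Int × Int)) : Prop := out = pareto_analysis_alt R C row_labels col_labels
instance (R : List (List Int)) (C : List (List Int)) (row_labels : Option (List String)) (col_labels : Option (List String)) (out : List (Int × Int × Int × Int)) : Decidable (Spec_pareto_analysis R C row_labels col_labels out) := by unfold Spec_pareto_analysis; infer_instance

-- ===== CLAIM (what is proved, stated in full; the proofs are below) =====
def Claim_equal_pareto_analysis : Prop := ∀ (R : List (List Int)) (C : List (List Int)) (row_labels : Option (List String)) (col_labels : Option (List String)), Dom_pareto_analysis R C row_labels col_labels → Pre_pareto_analysis R C row_labels col_labels → Spec_pareto_analysis R C row_labels col_labels (pareto_analysis R C row_labels col_labels)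

-- ===== LEMMAS AND PROOFS =====

-- b dominates a (both players at least as well off, one strictly better)
def pvBeats (b a : Int × Int) : Prop := a.1 ≤ b.1 ∧ a.2 ≤ b.2 ∧ (a.1 < b.1 ∨ a.2 < b.2)

-- a ≥ b in the reverse-lexicographic (descending sort) order
def pvRge (a b : Int × Int) : Prop := b.1 < a.1 ∨ (b.1 = a.1 ∧ b.2 ≤ a.2)

def pvOkB : Option Int → Int → Prop
  | none, _ => True
  | some v, c => v < c

def pvBefore (a b : Int × Int) : Bool :=
  decide (b.1 < a.1) || (!decide (a.1 < b.1) && decide (b.2 < a.2))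

def pvStep (acc : PySem.Set (Int × Int) × Option Int) (q : Int × Int) :
    PySem.Set (Int × Int) × Option Int :=
  match acc.2 with
  | none => (PySem.Set.add acc.1 q, some q.2)
  | some b => if b < q.2 then (PySem.Set.add acc.1 q, some q.2) else acc

lemma pvSorted2_eq (l : List (Int × Int)) :
    PySem.List.sorted2 l (fun x => x.1) (fun x => x.2) true =
      l.foldl (fun acc x => PySem.List.insertBy pvBefore x acc) [] := rfl

lemma pvInsert_pairwise (x : Int × Int) (ys : List (Int × Int)) (h : ys.Pairwise pvRge) :
    (PySem.List.insertBy pvBefore x ys).Pairwise pvRge := by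
  induction ys with
  | nil => simp [PySem.List.insertBy]
  | cons y t ih =>
    obtain ⟨hy, ht⟩ := List.pairwise_cons.mp h
    rw [show PySem.List.insertBy pvBefore x (y :: t) =
        if pvBefore x y then x :: y :: t else y :: PySem.List.insertBy pvBefore x t from rfl]
    by_cases hb : pvBefore x y = true
    · simp only [hb, if_true]
      refine List.pairwise_cons.mpr ⟨?_, h⟩
      intro z hz
      have hxy : pvRge x y := by
        simp only [pvBefore, Bool.or_eq_true, Bool.and_eq_true, Bool.not_eq_true',
          decide_eq_true_eq, decide_eq_false_iff_not] at hb
        unfold pvRge; omega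
      rcases List.mem_cons.mp hz with rfl | hz
      · exact hxy
      · have := hy z hz
        unfold pvRge at *; omega
    · rw [if_neg hb]
      refine List.pairwise_cons.mpr ⟨?_, ih ht⟩
      intro z hz
      rcases (PySem.List.mem_insertBy pvBefore x z t).mp hz with rfl | hz
      · simp only [pvBefore, Bool.or_eq_true, Bool.and_eq_true, Bool.not_eq_true',
          decide_eq_true_eq, decide_eq_false_iff_not, not_or, not_and] at hb
        unfold pvRge; omega
      · exact hy z hz

lemma pvFoldl_insert_pairwise (l : List (Int × Int)) :
    ∀ acc : List (Int × Int), acc.Pairwise pvRge →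
      (l.foldl (fun acc x => PySem.List.insertBy pvBefore x acc) acc).Pairwise pvRge := by
  induction l with
  | nil => intro acc h; simpa using h
  | cons x t ih => intro acc h; exact ih _ (pvInsert_pairwise x acc h)

lemma pvSorted2_pairwise (l : List (Int × Int)) :
    (PySem.List.sorted2 l (fun x => x.1) (fun x => x.2) true).Pairwise pvRge := by
  rw [pvSorted2_eq]; exact pvFoldl_insert_pairwise l [] (List.Pairwise.nil)

-- membership in the sweep's accumulated frontier set
lemma pvSweep_mem (pts : List (Int × Int)) :
    ∀ (S : List (Int × Int)) (best : Option Int) (x : Int × Int),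
      pts.Pairwise pvRge →
      (x ∈ (pts.foldl pvStep (S, best)).1 ↔
        x ∈ S ∨ (x ∈ pts ∧ (∀ b ∈ pts, ¬ pvBeats b x) ∧ pvOkB best x.2)) := by
  induction pts with
  | nil => intro S best x _; simp
  | cons hd t ih =>
    intro S best x hp
    obtain ⟨hhead, htail⟩ := List.pairwise_cons.mp hp
    obtain ⟨r, c⟩ := hd
    obtain ⟨x1, x2⟩ := x
    have hnd_rc : ¬ pvBeats (r, c) (r, c) := by unfold pvBeats; omega
    have hnd_t : ∀ y ∈ t, ¬ pvBeats y (r, c) := by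
      intro y hy; have := hhead y hy; unfold pvRge at this; unfold pvBeats; omega
    cases best with
    | none =>
      rw [List.foldl_cons, show pvStep (S, none) (r, c) = (PySem.Set.add S (r, c), some c) from rfl]
      rw [ih (PySem.Set.add S (r, c)) (some c) (x1, x2) htail]
      rw [PySem.Set.mem_add]
      constructor
      · rintro (⟨hS | heq⟩ | ⟨hxt, hnod, hc⟩)
        · exact Or.inl hS
        · obtain ⟨h1, h2⟩ := Prod.mk.injEq .. |>.mp heq
          subst h1; subst h2
          exact Or.inr ⟨List.mem_cons_self, List.forall_mem_cons.mpr ⟨hnd_rc, hnd_t⟩, trivial⟩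
        · refine Or.inr ⟨List.mem_cons_of_mem _ hxt, List.forall_mem_cons.mpr ⟨?_, hnod⟩, trivial⟩
          unfold pvOkB at hc; unfold pvBeats; omega
      · rintro (hS | ⟨hx, hnod, -⟩)
        · exact Or.inl (Or.inl hS)
        · obtain ⟨hnh, hnt⟩ := List.forall_mem_cons.mp hnod
          by_cases hxeq : ((x1, x2) : Int × Int) = (r, c)
          · exact Or.inl (Or.inr hxeq)
          · have hxt : (x1, x2) ∈ t := by
              rcases List.mem_cons.mp hx with h | h
              · exact absurd h hxeq
              · exact h
            refine Or.inr ⟨hxt, hnt, ?_⟩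
            have := hhead _ hxt
            rw [Prod.mk.injEq] at hxeq
            unfold pvRge at this; unfold pvBeats at hnh; unfold pvOkB; omega
    | some v =>
      by_cases hvc : v < c
      · rw [List.foldl_cons, show pvStep (S, some v) (r, c) = (PySem.Set.add S (r, c), some c) by
          simp [pvStep, hvc]]
        rw [ih (PySem.Set.add S (r, c)) (some c) (x1, x2) htail]
        rw [PySem.Set.mem_add]
        constructor
        · rintro (⟨hS | heq⟩ | ⟨hxt, hnod, hc⟩)
          · exact Or.inl hS
          · obtain ⟨h1, h2⟩ := Prod.mk.injEq .. |>.mp heq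
            subst h1; subst h2
            exact Or.inr ⟨List.mem_cons_self, List.forall_mem_cons.mpr ⟨hnd_rc, hnd_t⟩, hvc⟩
          · unfold pvOkB at hc
            refine Or.inr ⟨List.mem_cons_of_mem _ hxt, List.forall_mem_cons.mpr ⟨?_, hnod⟩, ?_⟩
            · unfold pvBeats; omega
            · unfold pvOkB; omega
        · rintro (hS | ⟨hx, hnod, hok⟩)
          · exact Or.inl (Or.inl hS)
          · obtain ⟨hnh, hnt⟩ := List.forall_mem_cons.mp hnod
            by_cases hxeq : ((x1, x2) : Int × Int) = (r, c)
            · exact Or.inl (Or.inr hxeq)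
            · have hxt : (x1, x2) ∈ t := by
                rcases List.mem_cons.mp hx with h | h
                · exact absurd h hxeq
                · exact h
              refine Or.inr ⟨hxt, hnt, ?_⟩
              have := hhead _ hxt
              rw [Prod.mk.injEq] at hxeq
              unfold pvRge at this; unfold pvBeats at hnh; unfold pvOkB; omega
      · rw [List.foldl_cons, show pvStep (S, some v) (r, c) = (S, some v) by simp [pvStep, hvc]]
        rw [ih S (some v) (x1, x2) htail]
        constructor
        · rintro (hS | ⟨hxt, hnod, hok⟩)
          · exact Or.inl hS
          · unfold pvOkB at hok
            refine Or.inr ⟨List.mem_cons_of_mem _ hxt, List.forall_mem_cons.mpr ⟨?_, hnod⟩, hok⟩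
            unfold pvBeats; omega
        · rintro (hS | ⟨hx, hnod, hok⟩)
          · exact Or.inl hS
          · obtain ⟨hnh, hnt⟩ := List.forall_mem_cons.mp hnod
            unfold pvOkB at hok
            rcases List.mem_cons.mp hx with heq | hxt
            · obtain ⟨h1, h2⟩ := Prod.mk.injEq .. |>.mp heq
              exfalso; simp only at hok; omega
            · exact Or.inr ⟨hxt, hnt, hok⟩

lemma pvMem_outcomes (R C : List (List Int)) (p : Int × Int × Int × Int) :
    p ∈ pvOutcomes R C ↔ ∃ i j : Int,
      (0 ≤ i ∧ i < (R.length : Int)) ∧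
      (0 ≤ j ∧ j < ((PySem.List.pyGetD R 0 []).length : Int)) ∧
      p = (i, j, PySem.List.pyGetD (PySem.List.pyGetD R i []) j 0,
                 PySem.List.pyGetD (PySem.List.pyGetD C i []) j 0) := by
  simp only [pvOutcomes, List.mem_flatMap, List.mem_map, PySem.List.mem_pyRange_one]
  constructor
  · rintro ⟨i, hi, j, hj, rfl⟩; exact ⟨i, j, hi, hj, rfl⟩
  · rintro ⟨i, j, hi, hj, rfl⟩; exact ⟨i, hi, j, hj, rfl⟩

lemma pvOutcomes_inj (R C : List (List Int)) (p q : Int × Int × Int × Int)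
    (hp : p ∈ pvOutcomes R C) (hq : q ∈ pvOutcomes R C)
    (h1 : q.1 = p.1) (h2 : q.2.1 = p.2.1) : q = p := by
  rw [pvMem_outcomes] at hp hq
  obtain ⟨i, j, -, -, rfl⟩ := hp
  obtain ⟨i', j', -, -, rfl⟩ := hq
  simp only at h1 h2
  rw [h1, h2]

-- A's inner loop is an existential over outcomes
lemma pvInnerA_iff (p : Int × Int × Int × Int) (l : List (Int × Int × Int × Int)) :
    pvInnerA p l = true ↔ ∃ q ∈ l, (q.1, q.2.1) ≠ (p.1, p.2.1) ∧
      q.2.2.1 ≥ p.2.2.1 ∧ q.2.2.2 ≥ p.2.2.2 ∧ (q.2.2.1 > p.2.2.1 ∨ q.2.2.2 > p.2.2.2) := by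
  induction l with
  | nil => simp [pvInnerA]
  | cons q t ih =>
    rw [show pvInnerA p (q :: t) =
        if (q.1, q.2.1) ≠ (p.1, p.2.1) ∧ q.2.2.1 ≥ p.2.2.1 ∧ q.2.2.2 ≥ p.2.2.2 ∧
            (q.2.2.1 > p.2.2.1 ∨ q.2.2.2 > p.2.2.2) then true else pvInnerA p t from rfl]
    by_cases hc : (q.1, q.2.1) ≠ (p.1, p.2.1) ∧ q.2.2.1 ≥ p.2.2.1 ∧ q.2.2.2 ≥ p.2.2.2 ∧
        (q.2.2.1 > p.2.2.1 ∨ q.2.2.2 > p.2.2.2)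
    · rw [if_pos hc]
      simp only [true_iff]
      exact ⟨q, List.mem_cons_self, hc⟩
    · rw [if_neg hc, ih]
      constructor
      · rintro ⟨b, hb, hcond⟩; exact ⟨b, List.mem_cons_of_mem _ hb, hcond⟩
      · rintro ⟨b, hb, hcond⟩
        rcases List.mem_cons.mp hb with rfl | hb
        · exact absurd hcond hc
        · exact ⟨b, hb, hcond⟩

-- the existential over outcomes equals domination over the payoff points
lemma pvExists_iff_dom (R C : List (List Int)) (p : Int × Int × Int × Int)
    (hp : p ∈ pvOutcomes R C) :
    (∃ q ∈ pvOutcomes R C, (q.1, q.2.1) ≠ (p.1, p.2.1) ∧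
      q.2.2.1 ≥ p.2.2.1 ∧ q.2.2.2 ≥ p.2.2.2 ∧ (q.2.2.1 > p.2.2.1 ∨ q.2.2.2 > p.2.2.2)) ↔
    (∃ b ∈ (pvOutcomes R C).map (fun p => (p.2.2.1, p.2.2.2)), pvBeats b (p.2.2.1, p.2.2.2)) := by
  constructor
  · rintro ⟨q, hq, -, h1, h2, h3⟩
    exact ⟨(q.2.2.1, q.2.2.2), List.mem_map_of_mem hq, h1, h2, h3⟩
  · rintro ⟨b, hb, hdom⟩
    obtain ⟨q, hq, rfl⟩ := List.mem_map.mp hb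
    refine ⟨q, hq, ?_, hdom.1, hdom.2.1, hdom.2.2⟩
    intro heq
    rw [Prod.mk.injEq] at heq
    have := pvOutcomes_inj R C p q hp hq heq.1 heq.2
    subst this
    unfold pvBeats at hdom; omega

lemma pvA_filter (R C : List (List Int)) (rl cl : Option (List String)) :
    pareto_analysis R C rl cl =
      (pvOutcomes R C).filter (fun p => !pvInnerA p (pvOutcomes R C)) := by
  show (pvOutcomes R C).foldl
      (fun acc p => if !pvInnerA p (pvOutcomes R C) then acc ++ [p] else acc) [] = _
  rw [PySem.List.foldl_append_if_eq_filter]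
  simp

lemma pvB_filter (R C : List (List Int)) (rl cl : Option (List String)) :
    pareto_analysis_alt R C rl cl =
      (pvOutcomes R C).filter (fun p => PySem.Set.contains
        (((PySem.List.sorted2 ((pvOutcomes R C).map (fun p => (p.2.2.1, p.2.2.2)))
            (fun x => x.1) (fun x => x.2) true).foldl pvStep ([], none)).1)
        (p.2.2.1, p.2.2.2)) := rfl

theorem pareto_analysis_spec : Claim_equal_pareto_analysis := by
  intro R C rl cl _ _
  unfold Spec_pareto_analysis
  rw [pvA_filter, pvB_filter]
  apply List.filter_congr
  intro p hp
  set spts := PySem.List.sorted2 ((pvOutcomes R C).map (fun p => (p.2.2.1, p.2.2.2)))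
      (fun x => x.1) (fun x => x.2) true with hspts
  have hperm : spts.Perm ((pvOutcomes R C).map (fun p => (p.2.2.1, p.2.2.2))) :=
    PySem.List.sorted2_perm _ _ _ _
  have hpair : spts.Pairwise pvRge := pvSorted2_pairwise _
  have hmemS := pvSweep_mem spts [] none (p.2.2.1, p.2.2.2) hpair
  rw [Bool.eq_iff_iff, Bool.not_eq_eq_eq_not, Bool.not_true, Bool.eq_false_iff,
    Ne, pvInnerA_iff, pvExists_iff_dom R C p hp]
  have hmm : ((p.2.2.1, p.2.2.2) : Int × Int) ∈
      (pvOutcomes R C).map (fun p => (p.2.2.1, p.2.2.2)) := List.mem_map_of_mem hp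
  constructor
  · intro hno
    have : ((p.2.2.1, p.2.2.2) : Int × Int) ∈ (spts.foldl pvStep ([], none)).1 := by
      rw [hmemS]
      refine Or.inr ⟨hperm.mem_iff.mpr hmm, ?_, trivial⟩
      intro b hb
      exact fun hd => hno ⟨b, hperm.mem_iff.mp hb, hd⟩
    simpa [PySem.Set.contains, List.contains_iff_mem] using this
  · intro hcont
    have hmem : ((p.2.2.1, p.2.2.2) : Int × Int) ∈ (spts.foldl pvStep ([], none)).1 := by
      simpa [PySem.Set.contains, List.contains_iff_mem] using hcont
    rw [hmemS] at hmem
    rcases hmem with h | ⟨-, hnod, -⟩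
    · simp at h
    · rintro ⟨b, hb, hdom⟩
      exact hnod b (hperm.mem_iff.mpr hb) hdom
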